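-- pv_equiv track=rewrite | github.com/TulasiSwathi/.py | revstrwithoutno.py | reverse_except_numbers
-- ===== SOURCE A (Python) =====
-- def reverse_except_numbers(input_str):
--     numbers = ''.join(filter(str.isdigit, input_str))
--     non_numbers = ''.join(filter(lambda x: not x.isdigit(), input_str))
--     reversed_non_numbers = non_numbers[::-1]
--
--     result = []
--     num_idx = 0
--
--     for char in input_str:
--         if char.isnumeric():
--             result.append(numbers[num_idx])
--             num_idx += 1
--         else:
--             result.append(reversed_non_numbers[0])
--             reversed_non_numbers = reversed_non_numbers[1:]
--
--     return ''.join(result)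
-- ===== SOURCE B (Python) =====
-- def reverse_except_numbers(input_str):
--     # One pass with an index pointer into the reversed non-digit characters
--     # (no repeated slicing, no separate digits string: digits are kept in place as-is).
--     rev = [c for c in reversed(input_str) if not c.isdigit()]
--     out = []
--     i = 0
--     for c in input_str:
--         if c.isdigit():
--             out.append(c)
--         else:
--             out.append(rev[i])
--             i += 1
--     return ''.join(out)
-- ===== Notes on version B (the rewrite author's own statement) =====
-- stated objective: faster
-- what changed: Replace A's quadratic loop (rebuilding the reversed-non-digit string by slicing [1:] each step, plus a separate digits string indexed by a counter) with a single pass that keeps each digit in place and reads the reversed non-digits through an advancing index pointer.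
import Mathlib
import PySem

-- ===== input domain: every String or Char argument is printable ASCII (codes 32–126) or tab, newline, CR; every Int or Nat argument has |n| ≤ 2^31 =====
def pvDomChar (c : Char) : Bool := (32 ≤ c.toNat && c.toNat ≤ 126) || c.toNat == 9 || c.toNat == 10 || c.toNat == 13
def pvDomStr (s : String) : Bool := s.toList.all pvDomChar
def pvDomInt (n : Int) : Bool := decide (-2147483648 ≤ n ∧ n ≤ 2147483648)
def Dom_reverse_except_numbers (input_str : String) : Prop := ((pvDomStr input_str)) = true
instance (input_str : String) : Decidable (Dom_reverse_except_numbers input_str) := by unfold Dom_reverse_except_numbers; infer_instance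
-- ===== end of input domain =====

-- B is a single O(n) pass with an index pointer into the reversed non-digits, replacing A's
-- O(n^2) repeated slicing; exact on the printable-ASCII domain (where str.isdigit = str.isnumeric = Char.isDigit).

-- ===== PORT A =====
-- A's loop step: state = (result, num_idx, reversed_non_numbers).
-- numbers[num_idx] / reversed_non_numbers[0]: the index is always in range here (each branch
-- consumes exactly one matching character), so the `.getD ' '` default is never reached.
-- reversed_non_numbers[1:] is PySem.List.slice with start 1.
def pvStepA (numbers : List Char) (st : List Char × Nat × List Char) (c : Char) :
    List Char × Nat × List Char :=
  let (result, num_idx, rnn) := st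
  if c.isDigit then
    (result ++ [(PySem.List.pyGet? numbers (num_idx : Int)).getD ' '], num_idx + 1, rnn)
  else
    (result ++ [(PySem.List.pyGet? rnn 0).getD ' '], num_idx, PySem.List.slice rnn (some 1) none)

def reverse_except_numbers (input_str : String) : String :=
  let cs := input_str.toList
  let numbers := cs.filter (fun c => c.isDigit)
  let non_numbers := cs.filter (fun c => !c.isDigit)
  let reversed_non_numbers := non_numbers.reverse  -- non_numbers[::-1] (PySem.List.slice?_none_none_neg_one)
  let st := cs.foldl (pvStepA numbers) ([], 0, reversed_non_numbers)
  String.ofList st.1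

-- ===== PORT B =====
-- B's loop step: state = (i, out); digits are kept in place, non-digits read rev[i].
def pvStepB (rev : List Char) (st : Nat × List Char) (c : Char) : Nat × List Char :=
  let (i, out) := st
  if c.isDigit then (i, out ++ [c])
  else (i + 1, out ++ [(PySem.List.pyGet? rev (i : Int)).getD ' '])

def reverse_except_numbers_alt (input_str : String) : String :=
  let cs := input_str.toList
  let rev := cs.reverse.filter (fun c => !c.isDigit)
  let st := cs.foldl (pvStepB rev) (0, [])
  String.ofList st.2

-- ===== PRECONDITION & SPEC =====
def Spec_reverse_except_numbers (input_str : String) (out : String) : Prop := out = reverse_except_numbers_alt input_str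
instance (input_str : String) (out : String) : Decidable (Spec_reverse_except_numbers input_str out) := by unfold Spec_reverse_except_numbers; infer_instance

-- ===== CLAIM (what is proved, stated in full; the proofs are below) =====
def Claim_equal_reverse_except_numbers : Prop := ∀ (input_str : String), Dom_reverse_except_numbers input_str → Spec_reverse_except_numbers input_str (reverse_except_numbers input_str)

-- ===== LEMMAS AND PROOFS =====

-- Loop correspondence: after processing prefix `pre` of the full string `pre ++ suf`,
-- A's state is (out, #digits of pre, R.drop (#nondigits of pre)) and B's is (#nondigits of pre, out),
-- where N = digits of the full string, R = reversed non-digits of the full string.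
lemma pv_loop_eq (suf : List Char) : ∀ (pre out : List Char),
    (suf.foldl (pvStepA ((pre ++ suf).filter (fun c => c.isDigit)))
      (out, (pre.filter (fun c => c.isDigit)).length,
        (((pre ++ suf).filter (fun c => !c.isDigit)).reverse).drop
          ((pre.filter (fun c => !c.isDigit)).length))).1
    = (suf.foldl (pvStepB (((pre ++ suf).filter (fun c => !c.isDigit)).reverse))
        ((pre.filter (fun c => !c.isDigit)).length, out)).2 := by
  induction suf with
  | nil => intro pre out; simp
  | cons c suf ih =>
    intro pre out
    have hfull : pre ++ c :: suf = (pre ++ [c]) ++ suf := by simp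
    by_cases hd : c.isDigit
    · -- digit step
      have hN : (pre ++ c :: suf).filter (fun c => c.isDigit)
          = pre.filter (fun c => c.isDigit) ++ c :: suf.filter (fun c => c.isDigit) := by
        simp [List.filter_append, hd]
      have hget : PySem.List.pyGet? ((pre ++ c :: suf).filter (fun c => c.isDigit))
          (((pre.filter (fun c => c.isDigit)).length : Int)) = some c := by
        rw [hN]; exact PySem.List.pyGet?_append_length _ _ _
      simp only [List.foldl_cons, pvStepA, pvStepB, hd, if_pos, hget, Option.getD_some]
      have := ih (pre ++ [c]) (out ++ [c])
      simpa [List.filter_append, hd] using this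
    · -- non-digit step
      set k := (pre.filter (fun c => !c.isDigit)).length with hk
      set R := ((pre ++ c :: suf).filter (fun c => !c.isDigit)).reverse with hR
      have hRlen : k < R.length := by
        rw [hR]
        simp [List.filter_append, hd, hk]
        omega
      -- A reads (R.drop k)[0], B reads R[k]: the same element
      have hgetA : PySem.List.pyGet? (R.drop k) 0 = R[k]? := by
        rw [PySem.List.pyGet?_zero, List.getElem?_drop, Nat.add_zero]
      have hgetB : PySem.List.pyGet? R ((k : Int)) = R[k]? :=
        PySem.List.pyGet?_natCast _ _
      -- A's rnn[1:] = R.drop (k+1)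
      have hslice : PySem.List.slice (R.drop k) (some 1) none = R.drop (k + 1) := by
        rw [PySem.List.slice_some_none]
        have h1 : PySem.List.clampIdx (R.drop k).length 1 = 1 := by
          simp [PySem.List.clampIdx]
          omega
        rw [h1, List.drop_drop]
      simp only [List.foldl_cons, pvStepA, pvStepB, hd, if_neg, Bool.false_eq_true,
        not_false_iff, hgetA, hgetB, hslice]
      have heq : (List.filter (fun c => !c.isDigit) (pre ++ [c])).length = k + 1 := by
        simp [List.filter_append, hd, hk]
      have := ih (pre ++ [c]) (out ++ [R[k]?.getD ' '])
      rw [heq, ← hfull, ← hR] at this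
      rw [List.filter_append] at this
      simpa [hd, hk] using this

lemma pv_eq (input_str : String) :
    reverse_except_numbers input_str = reverse_except_numbers_alt input_str := by
  have h := pv_loop_eq input_str.toList [] []
  simp only [List.nil_append, List.filter_nil, List.length_nil, List.drop_zero] at h
  simp only [reverse_except_numbers, reverse_except_numbers_alt, List.filter_reverse]
  exact congrArg String.ofList h

-- ===== VERDICT (by name: the statement is the Claim_ definition above) =====
theorem reverse_except_numbers_spec : Claim_equal_reverse_except_numbers := by
  intro s _
  unfold Spec_reverse_except_numbers
  exact pv_eq s
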